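-- pv_equiv track=rewrite | github.com/nicetiger/solar-esp | flowerparser/MQTTParser.py | getSensorGroup
-- ===== SOURCE A (Python) =====
-- listSensorGroups = [[0,1,2,3],[4,5,6,7]]                  #Defines which sensors are attached to the same ESP
--
-- def getSensorGroup ( iSensorId ):
--     idx=0
--     while idx < len(listSensorGroups):
--         idxSensor=0
--         while idxSensor < len(listSensorGroups[idx]):
--             if listSensorGroups[idx][idxSensor] == iSensorId:
--                 return idx
--             idxSensor+=1
--         idx+=1
--     return len(listSensorGroups)
-- ===== SOURCE B (Python) =====
-- listSensorGroups = [[0,1,2,3],[4,5,6,7]]                  #Defines which sensors are attached to the same ESP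
--
-- # Index once: map each sensor id to its group index, then one dict lookup.
-- _sensorToGroup = {}
-- for _idx, _group in enumerate(listSensorGroups):
--     for _s in _group:
--         _sensorToGroup[_s] = _idx
--
-- def getSensorGroup(iSensorId):
--     return _sensorToGroup.get(iSensorId, len(listSensorGroups))
-- ===== Notes on version B (the rewrite author's own statement) =====
-- stated objective: idiomatic
-- what changed: Replaced the nested index-while scan with a sensor-id -> group-index dict built once by enumerate, so the function body is a single dict .get with default len(listSensorGroups).
import Mathlib
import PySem

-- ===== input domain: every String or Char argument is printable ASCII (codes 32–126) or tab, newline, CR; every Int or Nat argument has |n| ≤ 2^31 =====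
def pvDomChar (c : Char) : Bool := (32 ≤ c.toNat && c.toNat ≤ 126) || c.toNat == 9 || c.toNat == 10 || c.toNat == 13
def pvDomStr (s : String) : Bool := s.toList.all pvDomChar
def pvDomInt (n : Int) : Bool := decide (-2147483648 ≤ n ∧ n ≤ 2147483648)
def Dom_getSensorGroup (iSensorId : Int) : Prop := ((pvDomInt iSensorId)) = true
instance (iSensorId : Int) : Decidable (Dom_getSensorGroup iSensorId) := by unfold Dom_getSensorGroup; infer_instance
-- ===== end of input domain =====

-- B replaces A's nested index-scan with a dict index built once by enumerate; objective: idiomatic.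

-- ===== PORT A =====
def listSensorGroups : List (List Int) := [[0,1,2,3],[4,5,6,7]]

-- inner while: scan one group by index
def pvAScanRow (row : List Int) (iSensorId : Int) : Bool :=
  match row with
  | [] => false
  | x :: xs => if x = iSensorId then true else pvAScanRow xs iSensorId

-- outer while: idx counts groups; falls through to len(listSensorGroups)
def pvAOuter (groups : List (List Int)) (idx : Int) (iSensorId : Int) : Int :=
  match groups with
  | [] => idx
  | g :: rest => if pvAScanRow g iSensorId then idx else pvAOuter rest (idx + 1) iSensorId

def getSensorGroup (iSensorId : Int) : Int :=
  pvAOuter listSensorGroups 0 iSensorId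

-- ===== PORT B =====
-- module-level index: sensor id -> group index, built by enumerate
def pvSensorToGroup : PySem.Dict Int Int :=
  (PySem.List.enumerate listSensorGroups 0).foldl
    (fun d p => p.2.foldl (fun d s => d.insert s p.1) d) PySem.Dict.empty

def getSensorGroup_alt (iSensorId : Int) : Int :=
  pvSensorToGroup.getD iSensorId (listSensorGroups.length : Int)

-- ===== PRECONDITION & SPEC =====
def Spec_getSensorGroup (iSensorId : Int) (out : Int) : Prop := out = getSensorGroup_alt iSensorId
instance (iSensorId : Int) (out : Int) : Decidable (Spec_getSensorGroup iSensorId out) := by unfold Spec_getSensorGroup; infer_instance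

-- ===== CLAIM (what is proved, stated in full; the proofs are below) =====
def Claim_equal_getSensorGroup : Prop := ∀ (iSensorId : Int), Dom_getSensorGroup iSensorId → Spec_getSensorGroup iSensorId (getSensorGroup iSensorId)

-- ===== LEMMAS AND PROOFS =====

-- both programs are piecewise on membership in {0,…,7}; case on each id
theorem getSensorGroup_eq_alt (i : Int) : getSensorGroup i = getSensorGroup_alt i := by
  by_cases h0 : i = 0; · subst h0; decide
  by_cases h1 : i = 1; · subst h1; decide
  by_cases h2 : i = 2; · subst h2; decide
  by_cases h3 : i = 3; · subst h3; decide
  by_cases h4 : i = 4; · subst h4; decide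
  by_cases h5 : i = 5; · subst h5; decide
  by_cases h6 : i = 6; · subst h6; decide
  by_cases h7 : i = 7; · subst h7; decide
  simp [getSensorGroup, getSensorGroup_alt, pvAOuter, pvAScanRow, pvSensorToGroup,
    listSensorGroups, PySem.List.enumerate, PySem.Dict.getD, PySem.Dict.get?,
    PySem.Dict.insert, PySem.Dict.empty,
    Ne.symm h0, Ne.symm h1, Ne.symm h2, Ne.symm h3, Ne.symm h4, Ne.symm h5, Ne.symm h6, Ne.symm h7]

-- ===== VERDICT (by name: the statement is the Claim_ definition above) =====
theorem getSensorGroup_spec : Claim_equal_getSensorGroup := by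
  intro i _
  exact getSensorGroup_eq_alt i
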